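-- pv_equiv track=rewrite | github.com/aledlie/ast-grep-mcp | scripts/import_helpers.py | scan_import_state
-- ===== SOURCE A (Python) =====
-- from typing import List, Sequence, Tuple
--
-- def scan_import_state(lines: Sequence[str], import_statement: str) -> Tuple[bool, int]:
--     """Return whether an import exists and the index of the last import line."""
--     has_import = False
--     import_line_index = -1
--
--     for line_index, line in enumerate(lines):
--         if import_statement in line:
--             has_import = True
--             break
--         if line.startswith("import ") or line.startswith("from "):
--             import_line_index = line_index
--
--     return has_import, import_line_index
-- ===== SOURCE B (Python) =====
-- def scan_import_state(lines, import_statement):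
--     """Return whether an import exists and the index of the last import line."""
--     match_idx = next((i for i, line in enumerate(lines) if import_statement in line), None)
--     has_import = match_idx is not None
--     prefix = list(lines) if match_idx is None else list(lines[:match_idx])
--     for offset, line in enumerate(reversed(prefix)):
--         if line.startswith("import ") or line.startswith("from "):
--             return has_import, len(prefix) - 1 - offset
--     return has_import, -1
-- ===== Notes on version B (the rewrite author's own statement) =====
-- stated objective: alternative
-- what changed: Replaces A's single forward loop with running break/accumulator state by two stateless passes: a forward search for the first line containing the statement, then a reverse prefix scan over the lines before it for the last import-style line.
import Mathlib
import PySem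

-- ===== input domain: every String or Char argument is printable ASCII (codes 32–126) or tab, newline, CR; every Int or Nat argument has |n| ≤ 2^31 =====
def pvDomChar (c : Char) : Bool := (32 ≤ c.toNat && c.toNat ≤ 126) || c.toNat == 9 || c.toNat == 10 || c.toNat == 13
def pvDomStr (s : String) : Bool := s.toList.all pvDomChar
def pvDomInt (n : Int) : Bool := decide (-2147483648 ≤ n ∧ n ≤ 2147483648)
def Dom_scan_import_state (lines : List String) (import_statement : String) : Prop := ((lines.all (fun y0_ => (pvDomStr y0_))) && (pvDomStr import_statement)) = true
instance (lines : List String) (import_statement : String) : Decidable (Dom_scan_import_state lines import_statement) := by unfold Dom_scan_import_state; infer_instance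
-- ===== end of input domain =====

-- ===== PORT A =====
-- One line honestly: B replaces A's single forward loop with break/accumulator state by two
-- stateless passes (forward first-match search, then reverse prefix scan); same O(n) cost.
def scanA (stmt : String) : List String → Int → Int → Bool × Int
  | [], _, acc => (false, acc)
  | l :: ls, i, acc =>
    if PySem.Str.isIn stmt l then (true, acc)
    else scanA stmt ls (i + 1)
      (if PySem.Str.startswith l "import " || PySem.Str.startswith l "from " then i else acc)

def scan_import_state (lines : List String) (import_statement : String) : Bool × Int :=
  scanA import_statement lines 0 (-1)

-- ===== PORT B =====
-- next((i for i, line in enumerate(lines) if import_statement in line), None)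
def findMatchB : List String → String → Option Nat
  | [], _ => none
  | l :: ls, stmt => if PySem.Str.isIn stmt l then some 0 else (findMatchB ls stmt).map (· + 1)

def isImpB (l : String) : Bool :=
  PySem.Str.startswith l "import " || PySem.Str.startswith l "from "

-- the reversed-prefix loop: first offset whose line is import-style
def revFindB : List String → Option Nat
  | [] => none
  | l :: ls => if isImpB l then some 0 else (revFindB ls).map (· + 1)

def scan_import_state_alt (lines : List String) (import_statement : String) : Bool × Int :=
  let m := findMatchB lines import_statement
  let pref := match m with | none => lines | some j => lines.take j
  match revFindB pref.reverse with
  | none => (m.isSome, -1)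
  | some k => (m.isSome, (pref.length : Int) - 1 - k)

-- ===== PRECONDITION & SPEC =====
def Spec_scan_import_state (lines : List String) (import_statement : String) (out : Bool × Int) : Prop := out = scan_import_state_alt lines import_statement
instance (lines : List String) (import_statement : String) (out : Bool × Int) : Decidable (Spec_scan_import_state lines import_statement out) := by unfold Spec_scan_import_state; infer_instance

-- ===== CLAIM (what is proved, stated in full; the proofs are below) =====
def Claim_equal_scan_import_state : Prop := ∀ (lines : List String) (import_statement : String), Dom_scan_import_state lines import_statement → Spec_scan_import_state lines import_statement (scan_import_state lines import_statement)

-- ===== LEMMAS AND PROOFS =====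

theorem revFindB_append_single (xs : List String) (l : String) :
    revFindB (xs ++ [l]) =
      match revFindB xs with
      | some k => some k
      | none => if isImpB l then some xs.length else none := by
  induction xs with
  | nil =>
    simp only [List.nil_append, revFindB, Option.map_none, List.length_nil]
  | cons x xs ih =>
    simp only [List.cons_append, revFindB, ih]
    by_cases hx : isImpB x
    · simp [hx]
    · have hx' : isImpB x = false := by simpa using hx
      simp only [hx', Bool.false_eq_true, if_false]
      cases h : revFindB xs with
      | none => by_cases hl : isImpB l <;> simp [hl]
      | some k => simp

theorem scanA_eq (stmt : String) (ls : List String) : ∀ (i acc : Int),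
    scanA stmt ls i acc =
      (let m := findMatchB ls stmt
       let pref := match m with | none => ls | some j => ls.take j
       match revFindB pref.reverse with
       | none => (m.isSome, acc)
       | some k => (m.isSome, i + ((pref.length : Int) - 1 - k))) := by
  induction ls with
  | nil => intro i acc; simp only [scanA, findMatchB, revFindB, List.reverse_nil, Option.isSome_none]
  | cons l ls ih =>
    intro i acc
    by_cases hl : PySem.Str.isIn stmt l
    · simp only [scanA, findMatchB, hl, if_true, List.take_zero, List.reverse_nil, revFindB,
        Option.isSome_some]
    · have hb : PySem.Str.isIn stmt l = false := by simpa using hl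
      have himp :
        (match findMatchB (l :: ls) stmt with
          | none => l :: ls
          | some j => (l :: ls).take j) =
        l :: (match findMatchB ls stmt with | none => ls | some j => ls.take j) := by
        simp only [findMatchB, hb, Bool.false_eq_true, if_false]
        cases findMatchB ls stmt <;> simp
      have hsome : (findMatchB (l :: ls) stmt).isSome = (findMatchB ls stmt).isSome := by
        simp only [findMatchB, hb, Bool.false_eq_true, if_false]
        cases findMatchB ls stmt <;> simp
      simp only [scanA, hb, Bool.false_eq_true, if_false, ih, himp]
      set pref := (match findMatchB ls stmt with | none => ls | some j => ls.take j) with hpref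
      have hrev : (l :: pref).reverse = pref.reverse ++ [l] := by simp
      rw [hrev, revFindB_append_single]
      cases hr : revFindB pref.reverse with
      | some k =>
        simp only [hsome, Prod.mk.injEq, List.length_cons]
        exact ⟨by trivial, by push_cast; ring⟩
      | none =>
        by_cases him : isImpB l
        · have him' : (PySem.Str.startswith l "import " || PySem.Str.startswith l "from ") = true := him
          simp only [him, him', if_true, List.length_reverse, List.length_cons, Prod.mk.injEq, hsome]
          exact ⟨by trivial, by push_cast; ring⟩
        · have him' : (PySem.Str.startswith l "import " || PySem.Str.startswith l "from ") = false := by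
            simpa [isImpB] using him
          simp only [him, Bool.false_eq_true, if_false, him', hsome]

-- ===== VERDICT (by name: the statement is the Claim_ definition above) =====
theorem scan_import_state_spec : Claim_equal_scan_import_state := by
  intro lines stmt _
  unfold Spec_scan_import_state scan_import_state scan_import_state_alt
  rw [scanA_eq]
  cases hr : revFindB ((match findMatchB lines stmt with | none => lines | some j => lines.take j).reverse) <;> simp [hr]
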